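-- pv_equiv track=rewrite | github.com/tanoy2002/PYTHON | prac13.py | arr_sum
-- ===== SOURCE A (Python) =====
-- def arr_sum(bin_arr):
--   l, r = 0, len(bin_arr) - 1
--   while l <= r:
--     m = (l + r) // 2
--     if bin_arr[m] == 0:
--       l = m + 1
--     else:
--       r = m - 1
--
--   return len(bin_arr) - l
-- ===== SOURCE B (Python) =====
-- def arr_sum(bin_arr):
--   # offset+length divide and conquer instead of a two-pointer while loop
--   def go(l, n):
--     if n == 0:
--       return l
--     k = (n - 1) // 2
--     if bin_arr[l + k] == 0:
--       return go(l + k + 1, n - 1 - k)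
--     return go(l, k)
--   return len(bin_arr) - go(0, len(bin_arr))
-- ===== Notes on version B (the rewrite author's own statement) =====
-- stated objective: alternative
-- what changed: Replaces the two-pointer (l,r) while loop with a recursive divide-and-conquer over an offset plus segment length (l,n), computing the probe as l+(n-1)//2 and recursing on the half segments.
import Mathlib
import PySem

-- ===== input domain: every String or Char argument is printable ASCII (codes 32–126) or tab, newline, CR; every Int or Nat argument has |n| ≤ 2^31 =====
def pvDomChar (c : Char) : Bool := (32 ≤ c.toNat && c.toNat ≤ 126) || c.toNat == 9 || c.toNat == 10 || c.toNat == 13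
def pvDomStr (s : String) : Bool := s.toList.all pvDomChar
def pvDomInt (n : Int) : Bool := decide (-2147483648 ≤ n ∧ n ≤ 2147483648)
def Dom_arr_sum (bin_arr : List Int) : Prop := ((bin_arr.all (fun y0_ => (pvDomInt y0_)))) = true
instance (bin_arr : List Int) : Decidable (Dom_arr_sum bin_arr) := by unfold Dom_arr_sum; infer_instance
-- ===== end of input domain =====

-- B replaces A's two-pointer while loop by a recursive divide-and-conquer over (offset, segment length); same values, alternative structure.

-- ===== PORT A =====
-- the while loop, state (l, r); bin_arr[m] always has 0 ≤ m < len while the loop runs,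
-- so the .getD 0 default of pyGet? is never taken (Python never raises here)
def arr_sumLoop (bin_arr : List Int) (l r : Int) : Int :=
  if h : l ≤ r then
    let m := PySem.Int.floordiv (l + r) 2
    if (PySem.List.pyGet? bin_arr m).getD 0 == 0 then
      arr_sumLoop bin_arr (m + 1) r
    else
      arr_sumLoop bin_arr l (m - 1)
  else l
termination_by (r + 1 - l).toNat
decreasing_by
  all_goals
    have hb := PySem.Int.floordiv_two_mid_bounds h
    omega

def arr_sum (bin_arr : List Int) : Int :=
  (bin_arr.length : Int) - arr_sumLoop bin_arr 0 ((bin_arr.length : Int) - 1)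

-- ===== PORT B =====
-- go(l, n): n is the (nonnegative) segment length, ported as Nat; probe index l + (n-1)//2
def arr_sumGo (bin_arr : List Int) (l : Int) : Nat → Int
  | 0 => l
  | Nat.succ p =>
    let k := p / 2   -- (n - 1) // 2 for n = p + 1
    if (PySem.List.pyGet? bin_arr (l + (k : Int))).getD 0 == 0 then
      arr_sumGo bin_arr (l + (k : Int) + 1) (p - k)
    else
      arr_sumGo bin_arr l k
decreasing_by all_goals omega

def arr_sum_alt (bin_arr : List Int) : Int :=
  (bin_arr.length : Int) - arr_sumGo bin_arr 0 bin_arr.length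

-- ===== PRECONDITION & SPEC =====
def Spec_arr_sum (bin_arr : List Int) (out : Int) : Prop := out = arr_sum_alt bin_arr
instance (bin_arr : List Int) (out : Int) : Decidable (Spec_arr_sum bin_arr out) := by unfold Spec_arr_sum; infer_instance

-- ===== CLAIM (what is proved, stated in full; the proofs are below) =====
def Claim_equal_arr_sum : Prop := ∀ (bin_arr : List Int), Dom_arr_sum bin_arr → Spec_arr_sum bin_arr (arr_sum bin_arr)

-- ===== LEMMAS AND PROOFS =====

-- the loop over [l, l+n-1] computes exactly go l n
theorem arr_sumLoop_eq_go (bin_arr : List Int) :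
    ∀ (n : Nat) (l : Int), arr_sumLoop bin_arr l (l + (n : Int) - 1) = arr_sumGo bin_arr l n := by
  intro n
  induction n using Nat.strong_induction_on with
  | _ n IH =>
    intro l
    match n with
    | 0 =>
      rw [arr_sumLoop]
      simp [arr_sumGo]
    | Nat.succ p =>
      rw [arr_sumLoop]
      have hle : l ≤ l + ((p + 1 : Nat) : Int) - 1 := by push_cast; omega
      rw [dif_pos hle]
      have hm : PySem.Int.floordiv (l + (l + ((p + 1 : Nat) : Int) - 1)) 2 = l + ((p / 2 : Nat) : Int) := by
        rw [PySem.Int.floordiv_eq_ediv_of_pos (by omega)]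
        push_cast
        omega
      rw [hm, arr_sumGo]
      simp only []
      split
      · have h1 : l + ((p / 2 : Nat) : Int) + 1 + ((p - p / 2 : Nat) : Int) - 1
            = l + ((p + 1 : Nat) : Int) - 1 := by push_cast; omega
        rw [← h1, IH (p - p / 2) (by omega)]
      · exact IH (p / 2) (by omega) l

-- ===== VERDICT (by name: the statement is the Claim_ definition above) =====
theorem arr_sum_spec : Claim_equal_arr_sum := by
  intro bin_arr _
  unfold Spec_arr_sum arr_sum arr_sum_alt
  rw [show ((bin_arr.length : Int) - 1) = 0 + (bin_arr.length : Int) - 1 by ring,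
    arr_sumLoop_eq_go]
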